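-- pv_equiv track=rewrite | github.com/retalily/gmal-legal-assistant | gmal_legal_assistant_openai.py | is_relevant_question
-- ===== SOURCE A (Python) =====
-- def is_relevant_question(question: str) -> bool:
--     keywords = [
--         "coastal", "rewilding", "restoration", "biodiversity", "wetland", "habitat",
--         "birds directive", "habitats directive", "water framework", "marine",
--         "climate law", "common agricultural policy", "nature restoration",
--         "eu biodiversity strategy", "ecosystem", "NRL", "MSFD", "WFD", "CAP", "Floods"
--     ]
--     question_lower = question.lower()
--     return any(kw in question_lower for kw in keywords)
-- ===== SOURCE B (Python) =====
-- def is_relevant_question(question: str) -> bool: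
--     # keywords indexed by first character: key -> list of keyword remainders
--     tails_by_first = {
--         'c': ["oastal", "limate law", "ommon agricultural policy"],
--         'r': ["ewilding", "estoration"],
--         'b': ["iodiversity", "irds directive"],
--         'w': ["etland", "ater framework"],
--         'h': ["abitat", "abitats directive"],
--         'm': ["arine"],
--         'n': ["ature restoration"],
--         'e': ["u biodiversity strategy", "cosystem"],
--         'N': ["RL"], 'M': ["SFD"], 'W': ["FD"], 'C': ["AP"], 'F': ["loods"],
--     }
--     q = question.lower()
--     for i, ch in enumerate(q):
--         for tail in tails_by_first.get(ch, []):
--             if q.startswith(tail, i + 1):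
--                 return True
--     return False
-- ===== Notes on version B (the rewrite author's own statement) =====
-- stated objective: alternative
-- what changed: Replaces the per-keyword independent substring scans (any(kw in q)) with a single left-to-right pass over the lowercased question driven by a first-character index: a dict mapping each keyword's first character to the list of keyword remainders, so only keywords starting at the current character are tried.
import Mathlib
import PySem

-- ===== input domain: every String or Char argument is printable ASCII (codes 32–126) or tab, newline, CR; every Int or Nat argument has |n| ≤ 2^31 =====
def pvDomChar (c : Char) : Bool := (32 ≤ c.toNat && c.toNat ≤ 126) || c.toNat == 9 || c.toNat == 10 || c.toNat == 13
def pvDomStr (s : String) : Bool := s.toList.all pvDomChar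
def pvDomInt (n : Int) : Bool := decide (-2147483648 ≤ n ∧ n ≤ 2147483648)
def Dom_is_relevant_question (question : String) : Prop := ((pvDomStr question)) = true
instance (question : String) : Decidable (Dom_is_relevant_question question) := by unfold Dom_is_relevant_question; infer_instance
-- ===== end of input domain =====

-- B replaces the per-keyword substring scans with one left-to-right pass over the
-- lowercased question driven by a first-character index (objective: alternative).

-- ===== PORT A =====
-- A's literal keyword list
def pvKeywords : List String := [
  "coastal", "rewilding", "restoration", "biodiversity", "wetland", "habitat",
  "birds directive", "habitats directive", "water framework", "marine",
  "climate law", "common agricultural policy", "nature restoration",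
  "eu biodiversity strategy", "ecosystem", "NRL", "MSFD", "WFD", "CAP", "Floods"]

def is_relevant_question (question : String) : Bool :=
  let question_lower := PySem.Str.lower question
  pvKeywords.any (fun kw => PySem.Str.isIn kw question_lower)

-- ===== PORT B =====
-- B's index: each keyword's first character mapped to the list of keyword remainders
def pvTailsByFirst : List (Char × List String) := [
  ('c', ["oastal", "limate law", "ommon agricultural policy"]),
  ('r', ["ewilding", "estoration"]),
  ('b', ["iodiversity", "irds directive"]),
  ('w', ["etland", "ater framework"]),
  ('h', ["abitat", "abitats directive"]),
  ('m', ["arine"]),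
  ('n', ["ature restoration"]),
  ('e', ["u biodiversity strategy", "cosystem"]),
  ('N', ["RL"]), ('M', ["SFD"]), ('W', ["FD"]), ('C', ["AP"]), ('F', ["loods"])]

-- hand-rolled q.startswith(tail, i+1): char-by-char prefix match against the suffix
def pvMatch : List Char → List Char → Bool
  | [], _ => true
  | _ :: _, [] => false
  | a :: as, b :: bs => a == b && pvMatch as bs

-- does some keyword start at the current character?
def pvHere (ch : Char) (rest : List Char) : Bool :=
  ((pvTailsByFirst.lookup ch).getD []).any (fun t => pvMatch t.toList rest)

def pvLoop : List Char → Bool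
  | [] => false
  | ch :: rest => pvHere ch rest || pvLoop rest

def is_relevant_question_alt (question : String) : Bool :=
  pvLoop (PySem.Chars.lower question.toList)

-- ===== PRECONDITION & SPEC =====
def Spec_is_relevant_question (question : String) (out : Bool) : Prop := out = is_relevant_question_alt question
instance (question : String) (out : Bool) : Decidable (Spec_is_relevant_question question out) := by unfold Spec_is_relevant_question; infer_instance

-- ===== CLAIM (what is proved, stated in full; the proofs are below) =====
def Claim_equal_is_relevant_question : Prop := ∀ (question : String), Dom_is_relevant_question question → Spec_is_relevant_question question (is_relevant_question question)

-- ===== LEMMAS AND PROOFS =====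

theorem pvMatch_eq (a b : List Char) : pvMatch a b = a.isPrefixOf b := by
  induction a generalizing b with
  | nil => simp [pvMatch, List.isPrefixOf]
  | cons x xs ih =>
      cases b with
      | nil => simp [pvMatch, List.isPrefixOf]
      | cons y ys => simp [pvMatch, List.isPrefixOf, ih]

-- the first-character dispatch tries exactly the keywords that can start here
theorem pvHere_eq (ch : Char) (rest : List Char) :
    pvHere ch rest = pvKeywords.any (fun kw => kw.toList.isPrefixOf (ch :: rest)) := by
  simp only [pvHere, pvTailsByFirst, List.lookup, pvKeywords, pvMatch_eq]
  by_cases h1 : ch = 'c'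
  · simp [h1, List.isPrefixOf]
  by_cases h2 : ch = 'r'
  · simp [h2, List.isPrefixOf]
  by_cases h3 : ch = 'b'
  · simp [h3, List.isPrefixOf]
  by_cases h4 : ch = 'w'
  · simp [h4, List.isPrefixOf]
  by_cases h5 : ch = 'h'
  · simp [h5, List.isPrefixOf]
  by_cases h6 : ch = 'm'
  · simp [h6, List.isPrefixOf]
  by_cases h7 : ch = 'n'
  · simp [h7, List.isPrefixOf]
  by_cases h8 : ch = 'e'
  · simp [h8, List.isPrefixOf]
  by_cases h9 : ch = 'N'
  · simp [h9, List.isPrefixOf]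
  by_cases h10 : ch = 'M'
  · simp [h10, List.isPrefixOf]
  by_cases h11 : ch = 'W'
  · simp [h11, List.isPrefixOf]
  by_cases h12 : ch = 'C'
  · simp [h12, List.isPrefixOf]
  by_cases h13 : ch = 'F'
  · simp [h13, List.isPrefixOf]
  have f : ∀ c : Char, ¬ ch = c → (ch == c) = false ∧ (c == ch) = false := by
    intro c h
    constructor <;> simp [h, Ne.symm h]
  simp [List.isPrefixOf, (f _ h1).1, (f _ h1).2, (f _ h2).1, (f _ h2).2, (f _ h3).1, (f _ h3).2,
    (f _ h4).1, (f _ h4).2, (f _ h5).1, (f _ h5).2, (f _ h6).1, (f _ h6).2, (f _ h7).1, (f _ h7).2,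
    (f _ h8).1, (f _ h8).2, (f _ h9).1, (f _ h9).2, (f _ h10).1, (f _ h10).2, (f _ h11).1, (f _ h11).2,
    (f _ h12).1, (f _ h12).2, (f _ h13).1, (f _ h13).2]

theorem pvLoop_iff (l : List Char) :
    pvLoop l = true ↔ ∃ kw ∈ pvKeywords, kw.toList <:+: l := by
  induction l with
  | nil => simp [pvLoop, pvKeywords]
  | cons c rest ih =>
      simp only [pvLoop, Bool.or_eq_true, pvHere_eq, List.any_eq_true, ih,
        List.isPrefixOf_iff_prefix, List.infix_cons_iff]
      constructor
      · rintro (⟨k, hk, hp⟩ | ⟨k, hk, hi⟩)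
        · exact ⟨k, hk, Or.inl hp⟩
        · exact ⟨k, hk, Or.inr hi⟩
      · rintro ⟨k, hk, hp | hi⟩
        · exact Or.inl ⟨k, hk, hp⟩
        · exact Or.inr ⟨k, hk, hi⟩

-- ===== VERDICT (by name: the statement is the Claim_ definition above) =====
theorem is_relevant_question_spec : Claim_equal_is_relevant_question := by
  intro question _
  unfold Spec_is_relevant_question is_relevant_question is_relevant_question_alt
  rw [Bool.eq_iff_iff, pvLoop_iff]
  simp [PySem.Chars.isIn_iff_infix, PySem.Str.toList_lower]
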